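-- pv_equiv track=rewrite | github.com/michalbublewicz/oioioi_blitzcup | oioioi/contests/utils.py | aggregate_statuses
-- ===== SOURCE A (Python) =====
-- def aggregate_statuses(statuses):
--     """Returns the decisive status while treating SKIP as neutral when possible."""
--
--     statuses = [s for s in statuses if s is not None]
--     failures = [s for s in statuses if s not in ('OK', 'SKIP')]
--     if failures:
--         return failures[0]
--     if any(s == 'OK' for s in statuses):
--         return 'OK'
--     if statuses and all(s == 'SKIP' for s in statuses):
--         return 'SKIP'
--     return 'OK'
-- ===== SOURCE B (Python) =====
-- def aggregate_statuses(statuses):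
--     """Returns the decisive status while treating SKIP as neutral when possible."""
--     seen_ok = False
--     seen_skip = False
--     for s in statuses:
--         if s is None:
--             continue
--         if s != 'OK' and s != 'SKIP':
--             return s
--         if s == 'OK':
--             seen_ok = True
--         else:
--             seen_skip = True
--     if seen_ok:
--         return 'OK'
--     if seen_skip:
--         return 'SKIP'
--     return 'OK'
-- ===== Notes on version B (the rewrite author's own statement) =====
-- stated objective: simpler
-- what changed: Replaces the four list passes (None-filter, failures list, any-OK scan, all-SKIP scan) with one short-circuiting loop carrying two booleans, returning the first failure immediately.
import Mathlib
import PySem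

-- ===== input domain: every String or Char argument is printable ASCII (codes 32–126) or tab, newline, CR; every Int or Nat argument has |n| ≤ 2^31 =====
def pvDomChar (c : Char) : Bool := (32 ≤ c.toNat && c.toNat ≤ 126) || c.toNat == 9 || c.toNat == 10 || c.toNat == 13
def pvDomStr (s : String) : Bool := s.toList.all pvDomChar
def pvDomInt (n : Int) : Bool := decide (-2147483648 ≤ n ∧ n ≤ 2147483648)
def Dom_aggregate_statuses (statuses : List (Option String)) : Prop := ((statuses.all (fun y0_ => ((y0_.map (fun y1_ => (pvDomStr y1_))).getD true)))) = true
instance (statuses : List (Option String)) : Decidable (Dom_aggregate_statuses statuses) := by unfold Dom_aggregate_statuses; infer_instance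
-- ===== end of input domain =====

-- B replaces A's four list passes with one short-circuiting loop carrying two booleans (objective: simpler).


-- ===== PORT A =====
def aggregate_statuses (statuses : List (Option String)) : String :=
  -- statuses = [s for s in statuses if s is not None]
  let sts := statuses.filterMap (fun s => s)
  -- failures = [s for s in statuses if s not in ('OK', 'SKIP')]
  let failures := sts.filter (fun s => !(s == "OK" || s == "SKIP"))
  match failures with
  | f :: _ => f
  | [] =>
    if sts.any (fun s => s == "OK") then "OK"
    else if !sts.isEmpty && sts.all (fun s => s == "SKIP") then "SKIP"
    else "OK"

-- ===== PORT B =====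
-- the for-loop of Source B, with its two boolean flags as accumulators
def aggLoop : List (Option String) → Bool → Bool → String
  | [], seen_ok, seen_skip =>
      if seen_ok then "OK" else if seen_skip then "SKIP" else "OK"
  | none :: rest, seen_ok, seen_skip => aggLoop rest seen_ok seen_skip
  | some s :: rest, seen_ok, seen_skip =>
      if s != "OK" && s != "SKIP" then s
      else if s == "OK" then aggLoop rest true seen_skip
      else aggLoop rest seen_ok true

def aggregate_statuses_alt (statuses : List (Option String)) : String :=
  aggLoop statuses false false

-- ===== PRECONDITION & SPEC =====
def Spec_aggregate_statuses (statuses : List (Option String)) (out : String) : Prop := out = aggregate_statuses_alt statuses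
instance (statuses : List (Option String)) (out : String) : Decidable (Spec_aggregate_statuses statuses out) := by unfold Spec_aggregate_statuses; infer_instance

-- ===== CLAIM (what is proved, stated in full; the proofs are below) =====
def Claim_equal_aggregate_statuses : Prop := ∀ (statuses : List (Option String)), Dom_aggregate_statuses statuses → Spec_aggregate_statuses statuses (aggregate_statuses statuses)

-- ===== LEMMAS AND PROOFS =====

-- Characterisation of the single-pass loop in terms of A's scans.
theorem aggLoop_eq (l : List (Option String)) : ∀ (so ss : Bool),
    aggLoop l so ss =
      match (l.filterMap (fun s => s)).filter (fun s => !(s == "OK" || s == "SKIP")) with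
      | f :: _ => f
      | [] =>
        if so || (l.filterMap (fun s => s)).any (fun s => s == "OK") then "OK"
        else if ss || (l.filterMap (fun s => s)).any (fun s => s == "SKIP") then "SKIP"
        else "OK" := by
  induction l with
  | nil => intro so ss; simp [aggLoop]
  | cons hd tl ih =>
    intro so ss
    cases hd with
    | none => simpa [aggLoop] using ih so ss
    | some s =>
      by_cases hOK : s = "OK"
      · subst hOK; simp [aggLoop, ih true ss]
      · by_cases hSK : s = "SKIP"
        · subst hSK
          simp only [aggLoop, List.filterMap_cons, List.filter_cons]
          simp [ih so true]
        · simp [aggLoop, hOK, hSK]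

-- If no failures and no "OK" survive the None-filter, every element is "SKIP".
theorem all_skip (sts : List String)
    (hf : sts.filter (fun s => !(s == "OK" || s == "SKIP")) = [])
    (hok : sts.any (fun s => s == "OK") = false) :
    ∀ x ∈ sts, x = "SKIP" := by
  intro x hx
  by_contra hne
  have hxok : x ≠ "OK" := by
    intro h
    rw [List.any_eq_false] at hok
    have := hok x hx
    simp [h] at this
  have hmem : x ∈ sts.filter (fun s => !(s == "OK" || s == "SKIP")) := by
    simp [List.mem_filter, hx, hxok, hne]
  rw [hf] at hmem
  exact absurd hmem (List.not_mem_nil)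

-- When every element is "SKIP", "nonempty ∧ all SKIP" collapses to "any SKIP".
theorem cond_eq (sts : List String) (h : ∀ x ∈ sts, x = "SKIP") :
    (!sts.isEmpty && sts.all (fun s => s == "SKIP")) = sts.any (fun s => s == "SKIP") := by
  cases sts with
  | nil => rfl
  | cons hd tl =>
    have hhd : hd = "SKIP" := h hd (by simp)
    have hall : ((hd :: tl).all (fun s => s == "SKIP")) = true := by
      rw [List.all_eq_true]
      intro x hx
      simpa using h x hx
    rw [hall]
    simp [List.any_cons, hhd]

-- ===== VERDICT (by name: the statement is the Claim_ definition above) =====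
theorem aggregate_statuses_spec : Claim_equal_aggregate_statuses := by
  intro statuses _
  unfold Spec_aggregate_statuses aggregate_statuses aggregate_statuses_alt
  rw [aggLoop_eq]
  cases hfl : (statuses.filterMap (fun s => s)).filter (fun s => !(s == "OK" || s == "SKIP")) with
  | cons f rest => simp only [hfl]
  | nil =>
    simp only [hfl, Bool.false_or]
    by_cases hok : ((statuses.filterMap (fun s => s)).any (fun s => s == "OK")) = true
    · rw [if_pos hok, if_pos hok]
    · have hok' : ((statuses.filterMap (fun s => s)).any (fun s => s == "OK")) = false :=
        eq_false_of_ne_true hok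
      rw [if_neg hok, if_neg hok,
          cond_eq _ (all_skip _ hfl hok')]
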